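-- pv_equiv track=rewrite | github.com/ClimateCompatibleGrowth/MUIO | API/Classes/Case/OsemosysClass.py | RYCn
-- ===== SOURCE A (Python) =====
-- def RYCn(RYCndata):
--     RYCn = {}
--     for param, obj1 in RYCndata.items():
--         RYCn[param] = {}
--         for sc, array in obj1.items():
--             RYCn[param][sc] = {}
--             for o in array:
--                 for year, val in o.items():
--                     if (year != 'ConId'):
--                         if year not in RYCn[param][sc]:
--                             RYCn[param][sc][year] = {}
--                         RYCn[param][sc][year][o['ConId']] = val
--     return RYCn
-- ===== SOURCE B (Python) =====
-- def RYCn(RYCndata):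
--     # Transposed two-phase build: per (param, sc) first collect the ordered set of
--     # year keys, then populate years-outer / objects-inner with dict comprehensions.
--     return {
--         param: {
--             sc: {
--                 y: {o['ConId']: o[y] for o in array if y in o}
--                 for y in dict.fromkeys(y for o in array for y in o if y != 'ConId')
--             }
--             for sc, array in obj1.items()
--         }
--         for param, obj1 in RYCndata.items()
--     }
-- ===== Notes on version B (the rewrite author's own statement) =====
-- stated objective: simpler
-- what changed: Replaces the interleaved single accumulation into nested mutable dicts by a two-phase pure comprehension: per (param, scenario) it first collects the ordered set of year keys, then transposes the traversal to years-outer/objects-inner to build each year's ConId map directly.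
import Mathlib
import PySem

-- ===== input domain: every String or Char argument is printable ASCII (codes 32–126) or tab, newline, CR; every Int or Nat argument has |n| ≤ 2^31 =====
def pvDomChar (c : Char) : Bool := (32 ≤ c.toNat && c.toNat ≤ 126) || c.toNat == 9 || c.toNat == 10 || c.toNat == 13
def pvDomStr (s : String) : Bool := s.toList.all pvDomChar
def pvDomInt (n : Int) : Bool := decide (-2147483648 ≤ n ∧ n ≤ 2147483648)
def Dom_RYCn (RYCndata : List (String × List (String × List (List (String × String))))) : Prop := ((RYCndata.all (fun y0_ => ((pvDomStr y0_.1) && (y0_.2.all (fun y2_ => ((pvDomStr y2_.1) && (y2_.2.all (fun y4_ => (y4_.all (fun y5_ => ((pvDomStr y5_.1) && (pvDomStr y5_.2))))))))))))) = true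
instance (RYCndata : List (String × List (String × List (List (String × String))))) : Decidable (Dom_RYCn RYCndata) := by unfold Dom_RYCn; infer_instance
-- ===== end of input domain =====

-- B replaces A's interleaved accumulation into nested mutable dicts by a two-phase pure
-- comprehension (collect the ordered year keys, then populate years-outer / objects-inner): simpler.

-- ===== PORT A =====
-- one step of A's innermost loop: for (year, val) in o.items(): if year != 'ConId': ensure slot, then set
def pvAStepYear (od : PySem.Dict String String)
    (d2 : PySem.Dict String (PySem.Dict String String)) (yv : String × String) :
    PySem.Dict String (PySem.Dict String String) :=
  if yv.1 ≠ "ConId" then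
    d2.insert yv.1 ((d2.getD yv.1 PySem.Dict.empty).insert (od.getD "ConId" "") yv.2)
  else d2

-- body of 'for o in array: …' (od.getD "ConId" "" stands for o['ConId']; Pre_ excludes the KeyError inputs)
def pvAObj (d2 : PySem.Dict String (PySem.Dict String String)) (o : List (String × String)) :
    PySem.Dict String (PySem.Dict String String) :=
  let od := PySem.Dict.ofList o
  od.items.foldl (pvAStepYear od) d2

-- RYCn[param][sc] after the whole array loop
def pvAArr (arr : List (List (String × String))) : PySem.Dict String (PySem.Dict String String) :=
  arr.foldl pvAObj PySem.Dict.empty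

def RYCn (RYCndata : List (String × List (String × List (List (String × String))))) :
    List (String × List (String × List (String × List (String × String)))) :=
  let top := (PySem.Dict.ofList RYCndata).items.foldl
    (fun acc pq =>
      acc.insert pq.1
        ((PySem.Dict.ofList pq.2).items.foldl
          (fun d1 sq => d1.insert sq.1 (pvAArr sq.2)) PySem.Dict.empty))
    (PySem.Dict.empty : PySem.Dict String (PySem.Dict String (PySem.Dict String (PySem.Dict String String))))
  top.items.map (fun p => (p.1, p.2.items.map (fun q => (q.1, q.2.items.map (fun r => (r.1, r.2.items))))))

-- ===== PORT B =====
-- dict.fromkeys(y for o in array for y in o if y != 'ConId'): the ordered set of year keys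
def pvBYears (arr : List (List (String × String))) : List String :=
  PySem.List.dedup ((arr.flatMap (fun o => (PySem.Dict.ofList o).keys)).filter (fun y => y ≠ "ConId"))

-- {o['ConId']: o[y] for o in array if y in o}
def pvBCol (arr : List (List (String × String))) (y : String) : PySem.Dict String String :=
  arr.foldl
    (fun d o =>
      let od := PySem.Dict.ofList o
      if od.contains y then d.insert (od.getD "ConId" "") (od.getD y "") else d)
    PySem.Dict.empty

def RYCn_alt (RYCndata : List (String × List (String × List (List (String × String))))) :
    List (String × List (String × List (String × List (String × String)))) :=
  (PySem.Dict.ofList RYCndata).items.map (fun pq =>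
    (pq.1, (PySem.Dict.ofList pq.2).items.map (fun sq =>
      (sq.1, (pvBYears sq.2).map (fun y => (y, (pvBCol sq.2 y).items))))))

-- ===== PRECONDITION & SPEC =====
-- Pre_ excludes exactly the inputs where Python A raises KeyError: some object has a year key
-- (a key ≠ 'ConId') but no 'ConId' key, so A's o['ConId'] raises (B raises identically there).
-- (Quantifying over the raw association lists also excludes such objects shadowed by a
-- duplicate param/sc key, which the Python dict would have discarded — a negligible narrowing.)
def Pre_RYCn (RYCndata : List (String × List (String × List (List (String × String))))) : Prop :=
  ∀ pq ∈ RYCndata, ∀ sq ∈ pq.2, ∀ o ∈ sq.2,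
    (∃ p ∈ o, p.1 ≠ "ConId") → ∃ p ∈ o, p.1 = "ConId"
instance (RYCndata : List (String × List (String × List (List (String × String))))) : Decidable (Pre_RYCn RYCndata) := by unfold Pre_RYCn; infer_instance

def pvWitness_RYCn : (List (String × List (String × List (List (String × String))))) :=
  [("p1", [("sc1", [[("ConId", "c1"), ("2020", "5")], [("ConId", "c2"), ("2020", "6"), ("2021", "7")]])])]

def Spec_RYCn (RYCndata : List (String × List (String × List (List (String × String))))) (out : List (String × List (String × List (String × List (String × String))))) : Prop := out = RYCn_alt RYCndata
instance (RYCndata : List (String × List (String × List (List (String × String))))) (out : List (String × List (String × List (String × List (String × String))))) : Decidable (Spec_RYCn RYCndata out) := by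
  unfold Spec_RYCn
  haveI h2 : DecidableEq (List (String × String)) := inferInstance
  haveI h3 : DecidableEq (List (String × List (String × String))) := inferInstance
  haveI h4 : DecidableEq (List (String × List (String × List (String × String)))) := inferInstance
  infer_instance

-- ===== CLAIM (what is proved, stated in full; the proofs are below) =====
def Claim_equal_RYCn : Prop := ∀ (RYCndata : List (String × List (String × List (List (String × String))))), Dom_RYCn RYCndata → Pre_RYCn RYCndata → Spec_RYCn RYCndata (RYCn RYCndata)

-- ===== LEMMAS AND PROOFS =====

-- map fst commutes with a fst-only filter
theorem pv_map_fst_filter (l : List (String × String)) (p : String → Bool) :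
    (l.filter (fun yv => p yv.1)).map Prod.fst = (l.map Prod.fst).filter p := by
  induction l with
  | nil => rfl
  | cons a t ih => by_cases h : p a.1 <;> simp [h, ih]

theorem pv_flatMap_filter (arr : List (List (String × String))) (p : String → Bool) :
    (arr.flatMap (fun o => ((PySem.Dict.ofList o).keys).filter p))
      = (arr.flatMap (fun o => (PySem.Dict.ofList o).keys)).filter p := by
  induction arr with
  | nil => rfl
  | cons a t ih => simp [List.flatMap_cons, List.filter_append, ih]

-- keys added by one object of A's loop
theorem pv_objKeys (d2 : PySem.Dict String (PySem.Dict String String)) (o : List (String × String)) :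
    (pvAObj d2 o).keys
      = PySem.Set.update d2.keys (((PySem.Dict.ofList o).keys).filter (fun y => decide (y ≠ "ConId"))) := by
  show ((PySem.Dict.ofList o).items.foldl (pvAStepYear (PySem.Dict.ofList o)) d2).keys = _
  unfold pvAStepYear
  rw [PySem.List.foldl_ite_eq_foldl_filter (p := fun yv : String × String => yv.1 ≠ "ConId")]
  rw [PySem.Dict.keys_foldl_insert_key _ Prod.fst]
  rw [pv_map_fst_filter _ (fun y => decide (y ≠ "ConId"))]
  rfl

theorem pv_arrKeys (arr : List (List (String × String)))
    (d2 : PySem.Dict String (PySem.Dict String String)) :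
    (arr.foldl pvAObj d2).keys
      = PySem.Set.update d2.keys
          (arr.flatMap (fun o => ((PySem.Dict.ofList o).keys).filter (fun y => decide (y ≠ "ConId")))) := by
  induction arr generalizing d2 with
  | nil => simp [PySem.Set.update]
  | cons o t ih =>
      rw [List.foldl_cons, ih, pv_objKeys, List.flatMap_cons, PySem.Set.update_append]

-- A's year keys, in order, are exactly B's collected years
theorem pv_keys_eq_years (arr : List (List (String × String))) :
    (pvAArr arr).keys = pvBYears arr := by
  unfold pvAArr pvBYears
  rw [pv_arrKeys, PySem.List.dedup_eq_ofList, ← pv_flatMap_filter]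
  rw [show (PySem.Dict.empty : PySem.Dict String (PySem.Dict String String)).keys = [] from rfl]
  rw [PySem.Set.update_nil_left]

-- the innermost fold's effect on one year slot
theorem pv_foldGetD (l : List (String × String)) (c : String) (y : String) (hy : y ≠ "ConId")
    (hnd : (l.map Prod.fst).Nodup) (d2 : PySem.Dict String (PySem.Dict String String)) :
    (l.foldl (fun d yv => if yv.1 ≠ "ConId" then
        d.insert yv.1 ((d.getD yv.1 PySem.Dict.empty).insert c yv.2) else d) d2).getD y PySem.Dict.empty
      = match l.find? (fun p => p.1 == y) with
        | some pv => (d2.getD y PySem.Dict.empty).insert c pv.2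
        | none => d2.getD y PySem.Dict.empty := by
  induction l generalizing d2 with
  | nil => simp
  | cons a t ih =>
      simp only [List.map_cons, List.nodup_cons] at hnd
      rw [List.foldl_cons, List.find?_cons]
      by_cases hay : a.1 = y
      · subst hay
        have hfind : t.find? (fun p => p.1 == a.1) = none := by
          rw [List.find?_eq_none]
          intro p hp
          simp only [beq_iff_eq]
          intro hbe
          exact hnd.1 (hbe ▸ List.mem_map_of_mem hp)
        rw [hfind]
        simp only [beq_self_eq_true, if_pos hy]
        rw [ih hnd.2]
        cases hfd : t.find? (fun p => p.1 == a.1) with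
        | none => simp [PySem.Dict.getD_insert_self]
        | some pv => exact absurd hfd (by rw [hfind]; simp)
      · have hbe : (a.1 == y) = false := by simpa using hay
        rw [hbe]
        by_cases hcon : a.1 ≠ "ConId"
        · rw [if_pos hcon, ih hnd.2]
          have hne : y ≠ a.1 := fun h => hay h.symm
          cases t.find? (fun p => p.1 == y) <;>
            rw [PySem.Dict.getD_insert_of_ne _ _ _ hne]
        · rw [if_neg hcon, ih hnd.2]

-- one object of A's loop updates slot y exactly as B's comprehension step does
theorem pv_objGetD (d2 : PySem.Dict String (PySem.Dict String String)) (o : List (String × String))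
    (y : String) (hy : y ≠ "ConId") :
    (pvAObj d2 o).getD y PySem.Dict.empty
      = if (PySem.Dict.ofList o).contains y then
          (d2.getD y PySem.Dict.empty).insert ((PySem.Dict.ofList o).getD "ConId" "")
            ((PySem.Dict.ofList o).getD y "")
        else d2.getD y PySem.Dict.empty := by
  have hnd : ((PySem.Dict.ofList o).items.map Prod.fst).Nodup := PySem.Dict.nodup_keys_ofList o
  show ((PySem.Dict.ofList o).items.foldl (pvAStepYear (PySem.Dict.ofList o)) d2).getD y PySem.Dict.empty = _
  unfold pvAStepYear
  rw [pv_foldGetD _ _ _ hy hnd]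
  have hget : (PySem.Dict.ofList o).get? y
      = ((PySem.Dict.ofList o).items.find? (fun p => p.1 == y)).map (·.2) := rfl
  cases hfd : (PySem.Dict.ofList o).items.find? (fun p => p.1 == y) with
  | some pv =>
      have h2 : (PySem.Dict.ofList o).get? y = some pv.2 := by rw [hget, hfd]; rfl
      rw [if_pos (by rw [PySem.Dict.contains_eq_isSome_get?, h2]; rfl)]
      rw [PySem.Dict.getD_of_get?_eq_some _ _ h2]
  | none =>
      have h2 : (PySem.Dict.ofList o).get? y = none := by rw [hget, hfd]; rfl
      rw [if_neg (by rw [PySem.Dict.contains_eq_isSome_get?, h2]; simp)]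

theorem pv_arrGetD (arr : List (List (String × String))) (y : String) (hy : y ≠ "ConId")
    (d2 : PySem.Dict String (PySem.Dict String String)) :
    (arr.foldl pvAObj d2).getD y PySem.Dict.empty
      = arr.foldl
          (fun d o =>
            if (PySem.Dict.ofList o).contains y then
              d.insert ((PySem.Dict.ofList o).getD "ConId" "") ((PySem.Dict.ofList o).getD y "")
            else d)
          (d2.getD y PySem.Dict.empty) := by
  induction arr generalizing d2 with
  | nil => rfl
  | cons o t ih =>
      rw [List.foldl_cons, List.foldl_cons, ih, pv_objGetD _ _ _ hy]

theorem pv_getD_eq_col (arr : List (List (String × String))) (y : String) (hy : y ≠ "ConId") :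
    (pvAArr arr).getD y PySem.Dict.empty = pvBCol arr y := by
  unfold pvAArr pvBCol
  rw [pv_arrGetD _ _ hy]
  rfl

-- per (param, sc): A's accumulated dict, rendered, is B's years-outer map
theorem pv_core (arr : List (List (String × String))) :
    (pvAArr arr).items.map (fun r => (r.1, r.2.items))
      = (pvBYears arr).map (fun y => (y, (pvBCol arr y).items)) := by
  have hnd : (pvAArr arr).keys.Nodup := by
    rw [pv_keys_eq_years]; exact PySem.List.nodup_dedup _
  rw [PySem.Dict.items_eq_map_keys _ hnd PySem.Dict.empty, List.map_map, pv_keys_eq_years]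
  apply List.map_congr_left
  intro y hyin
  have hy : y ≠ "ConId" := by
    unfold pvBYears at hyin
    have := (PySem.List.mem_dedup _ _).1 hyin
    simp only [List.mem_filter, decide_eq_true_eq] at this
    exact this.2
  simp only [Function.comp]
  rw [pv_getD_eq_col _ _ hy]

-- A's sc-level fold over fresh distinct keys is a map
theorem pv_scItems (obj1 : List (String × List (List (String × String)))) :
    ((PySem.Dict.ofList obj1).items.foldl
        (fun d1 sq => d1.insert sq.1 (pvAArr sq.2)) PySem.Dict.empty).items
      = (PySem.Dict.ofList obj1).items.map (fun sq => (sq.1, pvAArr sq.2)) := by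
  rw [PySem.Dict.items_foldl_insert_fresh _ Prod.fst (fun sq => pvAArr sq.2) PySem.Dict.empty
    (fun a _ => by simp) (PySem.Dict.nodup_keys_ofList obj1)]
  rfl

-- ===== VERDICT (by name: the statement is the Claim_ definition above) =====
theorem RYCn_spec : Claim_equal_RYCn := by
  intro data _ _
  unfold Spec_RYCn RYCn RYCn_alt
  dsimp only
  rw [PySem.Dict.items_foldl_insert_fresh _ Prod.fst
    (fun pq => (PySem.Dict.ofList pq.2).items.foldl
      (fun d1 sq => d1.insert sq.1 (pvAArr sq.2)) PySem.Dict.empty)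
    PySem.Dict.empty (fun a _ => by simp) (PySem.Dict.nodup_keys_ofList data)]
  rw [show (PySem.Dict.empty : PySem.Dict String (PySem.Dict String (PySem.Dict String (PySem.Dict String String)))).items = [] from rfl,
    List.nil_append, List.map_map]
  apply List.map_congr_left
  intro pq _
  simp only [Function.comp]
  rw [pv_scItems, List.map_map]
  refine congrArg _ ?_
  apply List.map_congr_left
  intro sq _
  simp only [Function.comp]
  rw [pv_core]
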